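-- pv_equiv track=rewrite | github.com/reggielondon-blip/llg-video-analyzer | app/analyzer.py | _detect_video_type
-- ===== SOURCE A (Python) =====
-- def _detect_video_type(file_name: str) -> str:
--     name_lower = file_name.lower()
--     if any(kw in name_lower for kw in ["body", "bwc", "bodycam", "body-cam"]):
--         return "Body Camera Footage"
--     if any(kw in name_lower for kw in ["dash", "incar", "in-car", "mvr", "patrol"]):
--         return "In-Car (Dashcam) Footage"
--     if any(kw in name_lower for kw in ["surveillance", "cctv", "security"]):
--         return "Surveillance / CCTV Footage"
--     if any(kw in name_lower for kw in ["cell", "phone", "bystander", "witness"]):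
--         return "Bystander / Cell Phone Footage"
--     return "Law Enforcement Video Evidence"
-- ===== SOURCE B (Python) =====
-- # Single left-to-right scan of the lowercased name: at each position, any keyword
-- # starting there lowers the best (smallest) matched category index; the final
-- # minimum picks the label.  Priority is category order, so this equals A's
-- # first-matching-branch result.
-- _KW = {
--     "body": 0, "bwc": 0, "bodycam": 0, "body-cam": 0,
--     "dash": 1, "incar": 1, "in-car": 1, "mvr": 1, "patrol": 1,
--     "surveillance": 2, "cctv": 2, "security": 2,
--     "cell": 3, "phone": 3, "bystander": 3, "witness": 3,
-- }
-- _LABELS = [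
--     "Body Camera Footage",
--     "In-Car (Dashcam) Footage",
--     "Surveillance / CCTV Footage",
--     "Bystander / Cell Phone Footage",
-- ]
--
--
-- def _detect_video_type(file_name: str) -> str:
--     s = file_name.lower()
--     best = 4
--     for i in range(len(s)):
--         for kw, cat in _KW.items():
--             if cat < best and s.startswith(kw, i):
--                 best = cat
--     return _LABELS[best] if best < 4 else "Law Enforcement Video Evidence"
-- ===== Notes on version B (the rewrite author's own statement) =====
-- stated objective: alternative
-- what changed: Instead of four sequential any-substring checks over the whole string, B makes a single position-by-position scan of the lowercased name, testing at each index which keyword starts there and keeping the minimum matched category index as an accumulator; the label is picked from that minimum at the end.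
import Mathlib
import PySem

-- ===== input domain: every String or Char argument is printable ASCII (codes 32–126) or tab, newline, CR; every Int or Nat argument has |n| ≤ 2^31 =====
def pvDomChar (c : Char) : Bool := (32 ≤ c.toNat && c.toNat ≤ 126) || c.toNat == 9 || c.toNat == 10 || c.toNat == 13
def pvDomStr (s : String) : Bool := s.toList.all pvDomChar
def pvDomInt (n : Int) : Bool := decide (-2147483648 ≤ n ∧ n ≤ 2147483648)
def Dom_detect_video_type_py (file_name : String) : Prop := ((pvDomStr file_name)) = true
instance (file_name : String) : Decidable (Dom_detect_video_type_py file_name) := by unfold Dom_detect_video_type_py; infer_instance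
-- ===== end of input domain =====

-- B replaces A's four sequential any-substring branch checks by one position-by-position
-- scan of the lowercased name that keeps the minimum matched category index (alternative
-- algorithm, same cost).


-- ===== PORT A =====
def detect_video_type_py (file_name : String) : String :=
  let name_lower := PySem.Str.lower file_name
  if ["body", "bwc", "bodycam", "body-cam"].any (fun kw => PySem.Str.isIn kw name_lower) then
    "Body Camera Footage"
  else if ["dash", "incar", "in-car", "mvr", "patrol"].any (fun kw => PySem.Str.isIn kw name_lower) then
    "In-Car (Dashcam) Footage"
  else if ["surveillance", "cctv", "security"].any (fun kw => PySem.Str.isIn kw name_lower) then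
    "Surveillance / CCTV Footage"
  else if ["cell", "phone", "bystander", "witness"].any (fun kw => PySem.Str.isIn kw name_lower) then
    "Bystander / Cell Phone Footage"
  else
    "Law Enforcement Video Evidence"

-- ===== PORT B =====
-- Source B's _KW dict in insertion order: (keyword as List Char, category index)
def pvKW : List (List Char × Nat) :=
  [("body".toList, 0), ("bwc".toList, 0), ("bodycam".toList, 0), ("body-cam".toList, 0),
   ("dash".toList, 1), ("incar".toList, 1), ("in-car".toList, 1), ("mvr".toList, 1), ("patrol".toList, 1),
   ("surveillance".toList, 2), ("cctv".toList, 2), ("security".toList, 2),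
   ("cell".toList, 3), ("phone".toList, 3), ("bystander".toList, 3), ("witness".toList, 3)]

def pvLabels : List String :=
  ["Body Camera Footage", "In-Car (Dashcam) Footage",
   "Surveillance / CCTV Footage", "Bystander / Cell Phone Footage"]

-- s.startswith(kw, i) with 0 ≤ i is exactly 'kw is a prefix of s[i:]'
def detect_video_type_py_alt (file_name : String) : String :=
  let s := (PySem.Str.lower file_name).toList
  let best := (List.range s.length).foldl
    (fun best i => pvKW.foldl
      (fun best p => if p.2 < best ∧ PySem.Chars.startswith (s.drop i) p.1 then p.2 else best)
      best) 4
  if best < 4 then pvLabels.getD best "Law Enforcement Video Evidence"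
  else "Law Enforcement Video Evidence"

-- ===== PRECONDITION & SPEC =====
def Spec_detect_video_type_py (file_name : String) (out : String) : Prop := out = detect_video_type_py_alt file_name
instance (file_name : String) (out : String) : Decidable (Spec_detect_video_type_py file_name out) := by unfold Spec_detect_video_type_py; infer_instance

-- ===== CLAIM (what is proved, stated in full; the proofs are below) =====
def Claim_equal_detect_video_type_py : Prop := ∀ (file_name : String), Dom_detect_video_type_py file_name → Spec_detect_video_type_py file_name (detect_video_type_py file_name)

-- ===== LEMMAS AND PROOFS =====

-- a fold whose step satisfies 'g b x <= c iff b <= c or Q x c' computes a running minimum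
theorem pv_foldl_le_iff {α : Type} (g : Nat → α → Nat) (Q : α → Nat → Prop)
    (hg : ∀ b x c, g b x ≤ c ↔ (b ≤ c ∨ Q x c)) :
    ∀ (l : List α) (b c : Nat), l.foldl g b ≤ c ↔ (b ≤ c ∨ ∃ x ∈ l, Q x c) := by
  intro l
  induction l with
  | nil => simp
  | cons x xs ih =>
    intro b c
    rw [List.foldl_cons, ih, hg]
    simp only [List.mem_cons]
    constructor
    · rintro ((h | h) | ⟨y, hy, hQ⟩)
      · exact Or.inl h
      · exact Or.inr ⟨x, Or.inl rfl, h⟩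
      · exact Or.inr ⟨y, Or.inr hy, hQ⟩
    · rintro (h | ⟨y, rfl | hy, hQ⟩)
      · exact Or.inl (Or.inl h)
      · exact Or.inl (Or.inr hQ)
      · exact Or.inr ⟨y, hy, hQ⟩

theorem pv_step_le_iff (P : List Char × Nat → Bool) (b c : Nat) (p : List Char × Nat) :
    (if p.2 < b ∧ P p then p.2 else b) ≤ c ↔ (b ≤ c ∨ (P p = true ∧ p.2 ≤ c)) := by
  split_ifs with h
  · obtain ⟨h1, h2⟩ := h
    constructor
    · intro hle; exact Or.inr ⟨h2, hle⟩
    · rintro (hle | ⟨_, hle⟩) <;> omega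
  · rw [Classical.not_and_iff_not_or_not] at h
    constructor
    · exact Or.inl
    · rintro (hle | ⟨hP, hle⟩)
      · exact hle
      · rcases h with h | h
        · omega
        · simp [hP] at h

-- characterization of B's best accumulator
theorem pv_best_le_iff (s : List Char) (c : Nat) :
    (List.range s.length).foldl
      (fun best i => pvKW.foldl
        (fun best p => if p.2 < best ∧ PySem.Chars.startswith (s.drop i) p.1 then p.2 else best)
        best) 4 ≤ c ↔
    (4 ≤ c ∨ ∃ i < s.length, ∃ p ∈ pvKW, PySem.Chars.startswith (s.drop i) p.1 = true ∧ p.2 ≤ c) := by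
  rw [pv_foldl_le_iff _ (fun i c => ∃ p ∈ pvKW, PySem.Chars.startswith (s.drop i) p.1 = true ∧ p.2 ≤ c)]
  · simp [List.mem_range]
  · intro b i c'
    rw [pv_foldl_le_iff _ (fun p c => PySem.Chars.startswith (s.drop i) p.1 = true ∧ p.2 ≤ c)]
    intro b' p c''
    exact pv_step_le_iff (fun p => PySem.Chars.startswith (s.drop i) p.1) b' c'' p

-- every keyword in the table is nonempty
theorem pvKW_ne_nil : ∀ p ∈ pvKW, p.1 ≠ [] := by decide

-- positional matches of a nonempty keyword occur at indices < length, and are substring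
theorem pv_exists_pos_iff (s kw : List Char) (hkw : kw ≠ []) :
    (∃ i < s.length, PySem.Chars.startswith (s.drop i) kw = true) ↔
      PySem.Chars.isIn kw s = true := by
  rw [← PySem.Chars.exists_prefix_drop_iff_isIn]
  constructor
  · rintro ⟨i, _, h⟩
    exact ⟨i, (PySem.Chars.startswith_iff _ _).mp h⟩
  · rintro ⟨j, h⟩
    by_cases hj : j < s.length
    · exact ⟨j, hj, (PySem.Chars.startswith_iff _ _).mpr h⟩
    · exfalso
      have hnil : s.drop j = [] := List.drop_eq_nil_of_le (by omega)
      rw [hnil] at h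
      exact hkw (List.prefix_nil.mp h)

set_option maxHeartbeats 400000 in
theorem detect_video_type_py_spec : Claim_equal_detect_video_type_py := by
  intro file_name _
  unfold Spec_detect_video_type_py detect_video_type_py detect_video_type_py_alt
  simp only []
  set s := (PySem.Str.lower file_name).toList with hs
  set best := (List.range s.length).foldl
    (fun best i => pvKW.foldl
      (fun best p => if p.2 < best ∧ PySem.Chars.startswith (s.drop i) p.1 then p.2 else best)
      best) 4 with hbest
  have hle : ∀ c, best ≤ c ↔
      (4 ≤ c ∨ ∃ p ∈ pvKW, PySem.Chars.isIn p.1 s = true ∧ p.2 ≤ c) := by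
    intro c
    rw [hbest, pv_best_le_iff]
    constructor
    · rintro (h | ⟨i, hi, p, hp, hst, hc⟩)
      · exact Or.inl h
      · exact Or.inr ⟨p, hp, (pv_exists_pos_iff s p.1 (pvKW_ne_nil p hp)).mp ⟨i, hi, hst⟩, hc⟩
    · rintro (h | ⟨p, hp, hin, hc⟩)
      · exact Or.inl h
      · obtain ⟨i, hi, hst⟩ := (pv_exists_pos_iff s p.1 (pvKW_ne_nil p hp)).mpr hin
        exact Or.inr ⟨i, hi, p, hp, hst, hc⟩
  have h4 : best ≤ 4 := (hle 4).mpr (Or.inl le_rfl)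
  have e0 := hle 0
  have e1 := hle 1
  have e2 := hle 2
  have e3 := hle 3
  clear hle hbest
  simp only [pvKW, List.mem_cons, List.not_mem_nil, or_false, exists_eq_or_imp,
    exists_eq_left] at e0 e1 e2 e3
  norm_num at e0 e1 e2 e3
  have hiso : ∀ kw : String, PySem.Str.isIn kw (PySem.Str.lower file_name) =
      PySem.Chars.isIn kw.toList s := by
    intro kw; rw [hs, PySem.Str.isIn_eq]
  clear hs
  clear_value best s
  by_cases h0 : (["body", "bwc", "bodycam", "body-cam"].any
      (fun kw => PySem.Str.isIn kw (PySem.Str.lower file_name))) = true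
  · have hd0 := h0
    simp only [List.any_cons, List.any_nil, Bool.or_eq_true, Bool.or_false, hiso] at hd0
    have hb : best = 0 := e0.mpr hd0
    rw [if_pos h0, hb]
    rfl
  · have hd0 := h0
    simp only [List.any_cons, List.any_nil, Bool.or_eq_true, Bool.or_false, hiso] at hd0
    have hn0 : best ≠ 0 := fun h => hd0 (e0.mp h)
    by_cases h1 : (["dash", "incar", "in-car", "mvr", "patrol"].any
        (fun kw => PySem.Str.isIn kw (PySem.Str.lower file_name))) = true
    · have hd1 := h1
      simp only [List.any_cons, List.any_nil, Bool.or_eq_true, Bool.or_false, hiso] at hd1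
      have hb : best = 1 := by
        have hle1 : best ≤ 1 := e1.mpr (Or.inr (Or.inr (Or.inr (Or.inr hd1))))
        omega
      rw [if_neg h0, if_pos h1, hb]
      rfl
    · have hd1 := h1
      simp only [List.any_cons, List.any_nil, Bool.or_eq_true, Bool.or_false, hiso] at hd1
      have hn1 : ¬ best ≤ 1 := by
        intro h
        rcases e1.mp h with h' | h' | h' | h' | h'
        · exact hd0 (Or.inl h')
        · exact hd0 (Or.inr (Or.inl h'))
        · exact hd0 (Or.inr (Or.inr (Or.inl h')))
        · exact hd0 (Or.inr (Or.inr (Or.inr h')))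
        · exact hd1 h'
      by_cases h2 : (["surveillance", "cctv", "security"].any
          (fun kw => PySem.Str.isIn kw (PySem.Str.lower file_name))) = true
      · have hd2 := h2
        simp only [List.any_cons, List.any_nil, Bool.or_eq_true, Bool.or_false, hiso] at hd2
        have hb : best = 2 := by
          have hle2 : best ≤ 2 := e2.mpr (Or.inr (Or.inr (Or.inr (Or.inr
            (Or.inr (Or.inr (Or.inr (Or.inr (Or.inr hd2)))))))))
          omega
        rw [if_neg h0, if_neg h1, if_pos h2, hb]
        rfl
      · have hd2 := h2
        simp only [List.any_cons, List.any_nil, Bool.or_eq_true, Bool.or_false, hiso] at hd2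
        have hn2 : ¬ best ≤ 2 := by
          intro h
          rcases e2.mp h with h' | h' | h' | h' | h' | h' | h' | h' | h' | h'
          · exact hd0 (Or.inl h')
          · exact hd0 (Or.inr (Or.inl h'))
          · exact hd0 (Or.inr (Or.inr (Or.inl h')))
          · exact hd0 (Or.inr (Or.inr (Or.inr h')))
          · exact hd1 (Or.inl h')
          · exact hd1 (Or.inr (Or.inl h'))
          · exact hd1 (Or.inr (Or.inr (Or.inl h')))
          · exact hd1 (Or.inr (Or.inr (Or.inr (Or.inl h'))))
          · exact hd1 (Or.inr (Or.inr (Or.inr (Or.inr h'))))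
          · exact hd2 h'
        by_cases h3 : (["cell", "phone", "bystander", "witness"].any
            (fun kw => PySem.Str.isIn kw (PySem.Str.lower file_name))) = true
        · have hd3 := h3
          simp only [List.any_cons, List.any_nil, Bool.or_eq_true, Bool.or_false, hiso] at hd3
          have hb : best = 3 := by
            have hle3 : best ≤ 3 := e3.mpr (Or.inr (Or.inr (Or.inr (Or.inr
              (Or.inr (Or.inr (Or.inr (Or.inr (Or.inr (Or.inr (Or.inr (Or.inr hd3))))))))))))
            omega
          rw [if_neg h0, if_neg h1, if_neg h2, if_pos h3, hb]
          rfl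
        · have hd3 := h3
          simp only [List.any_cons, List.any_nil, Bool.or_eq_true, Bool.or_false, hiso] at hd3
          have hn3 : ¬ best ≤ 3 := by
            intro h
            rcases e3.mp h with h' | h' | h' | h' | h' | h' | h' | h' | h' | h' | h' | h' | h'
            · exact hd0 (Or.inl h')
            · exact hd0 (Or.inr (Or.inl h'))
            · exact hd0 (Or.inr (Or.inr (Or.inl h')))
            · exact hd0 (Or.inr (Or.inr (Or.inr h')))
            · exact hd1 (Or.inl h')
            · exact hd1 (Or.inr (Or.inl h'))
            · exact hd1 (Or.inr (Or.inr (Or.inl h')))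
            · exact hd1 (Or.inr (Or.inr (Or.inr (Or.inl h'))))
            · exact hd1 (Or.inr (Or.inr (Or.inr (Or.inr h'))))
            · exact hd2 (Or.inl h')
            · exact hd2 (Or.inr (Or.inl h'))
            · exact hd2 (Or.inr (Or.inr h'))
            · exact hd3 h'
          have hb : best = 4 := by omega
          rw [if_neg h0, if_neg h1, if_neg h2, if_neg h3, hb]
          rfl
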